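-- pv_equiv track=rewrite | github.com/adityardesai/Coding | DataStructures/arrays/codility/forbidden_swaps.py | solution
-- ===== SOURCE A (Python) =====
-- def solution(s):
--     if not s:
--         return 0
--     three_count=0
--     for i in range(len(s)):
--         temp_length=1
--         while i+1 < len(s) and s[i]==s[i+1]:
--             temp_length+=1
--             i+=1
--         three_count+= temp_length//3
--     return three_count
-- ===== SOURCE B (Python) =====
-- def solution(s):
--     total = 0
--     i = 0
--     n = len(s)
--     while i < n:
--         j = i
--         while j < n and s[j] == s[i]:
--             j += 1
--         L = j - i
--         q, r = divmod(L + 1, 3)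
--         total += 3 * q * (q - 1) // 2 + q * r
--         i = j
--     return total
-- ===== Notes on version B (the rewrite author's own statement) =====
-- stated objective: faster
-- what changed: Instead of recomputing the run length forward from every index (quadratic), B walks each maximal run once and adds the closed form sum_{m=1..L} floor(m/3) = 3q(q-1)/2 + qr with q,r = divmod(L+1,3).
import Mathlib
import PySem

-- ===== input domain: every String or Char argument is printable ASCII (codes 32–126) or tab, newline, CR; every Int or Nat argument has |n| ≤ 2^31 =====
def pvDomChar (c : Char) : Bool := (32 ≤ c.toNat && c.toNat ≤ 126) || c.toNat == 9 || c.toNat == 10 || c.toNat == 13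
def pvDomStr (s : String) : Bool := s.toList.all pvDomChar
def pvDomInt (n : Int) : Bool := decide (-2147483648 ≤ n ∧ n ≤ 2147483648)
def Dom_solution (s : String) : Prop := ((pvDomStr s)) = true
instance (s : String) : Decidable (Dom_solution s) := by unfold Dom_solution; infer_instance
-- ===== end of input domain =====

-- B replaces A's per-index rescan of its run with one pass over maximal runs plus a closed-form per-run sum (objective: faster).

-- ===== PORT A =====
-- inner while loop of A: temp_length grows while s[i] == s[i+1]; fuel (= cs.length at the call) only makes it total
def aRun (cs : List Char) : Nat → Nat → Nat → Nat
  | 0, _, t => t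
  | fuel+1, i, t => if i + 1 < cs.length ∧ cs[i]! = cs[i+1]! then aRun cs fuel (i+1) (t+1) else t

def solution (s : String) : Int :=
  let cs := s.toList
  if cs.isEmpty then 0
  else ((List.range cs.length).foldl (fun acc i => acc + aRun cs cs.length i 1 / 3) 0 : Nat)

-- ===== PORT B =====
-- inner while loop of B: advance j while s[j] == s[i] (c = s[i]); fuel (= cs.length at the call) only makes it total
def bRun (cs : List Char) (c : Char) : Nat → Nat → Nat
  | 0, j => j
  | fuel+1, j => if j < cs.length ∧ cs[j]! = c then bRun cs c fuel (j+1) else j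

-- outer while loop of B; fuel (= cs.length at the call) only makes it total
def bLoop (cs : List Char) : Nat → Nat → Nat → Nat
  | 0, _, total => total
  | fuel+1, i, total =>
    if i < cs.length then
      let j := bRun cs (cs[i]!) cs.length i
      let L := j - i
      let q := (L + 1) / 3
      let r := (L + 1) % 3
      bLoop cs fuel j (total + 3 * q * (q - 1) / 2 + q * r)
    else total

def solution_alt (s : String) : Int := (bLoop s.toList s.toList.length 0 0 : Nat)

-- ===== PRECONDITION & SPEC =====
def Spec_solution (s : String) (out : Int) : Prop := out = solution_alt s
instance (s : String) (out : Int) : Decidable (Spec_solution s out) := by unfold Spec_solution; infer_instance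

-- ===== CLAIM (what is proved, stated in full; the proofs are below) =====
def Claim_equal_solution : Prop := ∀ (s : String), Dom_solution s → Spec_solution s (solution s)

-- ===== LEMMAS AND PROOFS =====

theorem bRun_ge (cs : List Char) (c : Char) (fuel : Nat) : ∀ j, j ≤ bRun cs c fuel j := by
  induction fuel with
  | zero => intro j; exact Nat.le_refl j
  | succ n ih =>
    intro j
    simp only [bRun]
    split
    · exact Nat.le_trans (Nat.le_succ j) (ih (j+1))
    · exact Nat.le_refl j

theorem bRun_le (cs : List Char) (c : Char) (fuel : Nat) :
    ∀ j, j ≤ cs.length → bRun cs c fuel j ≤ cs.length := by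
  induction fuel with
  | zero => intro j hj; exact hj
  | succ n ih =>
    intro j hj
    simp only [bRun]
    split
    · next h => exact ih (j+1) h.1
    · exact hj

theorem bRun_start_lt (cs : List Char) (c : Char) (fuel : Nat) (j : Nat)
    (hj : j < cs.length) (hc : cs[j]! = c) (hf : 1 ≤ fuel) : j + 1 ≤ bRun cs c fuel j := by
  cases fuel with
  | zero => omega
  | succ n =>
    simp only [bRun]
    rw [if_pos ⟨hj, hc⟩]
    exact bRun_ge cs c n (j+1)

theorem bRun_mem (cs : List Char) (c : Char) (fuel : Nat) :
    ∀ j m, j ≤ m → m < bRun cs c fuel j → m < cs.length ∧ cs[m]! = c := by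
  induction fuel with
  | zero => intro j m h1 h2; simp only [bRun] at h2; omega
  | succ n ih =>
    intro j m h1 h2
    simp only [bRun] at h2
    split at h2
    · next h =>
      rcases Nat.eq_or_lt_of_le h1 with rfl | hlt
      · exact h
      · exact ih (j+1) m hlt h2
    · omega

theorem bRun_stop (cs : List Char) (c : Char) (fuel : Nat) :
    ∀ j, cs.length ≤ fuel + j → bRun cs c fuel j < cs.length → cs[bRun cs c fuel j]! ≠ c := by
  induction fuel with
  | zero => intro j hf h; simp only [bRun] at h ⊢; omega
  | succ n ih =>
    intro j hf
    simp only [bRun]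
    split
    · next h => exact ih (j+1) (by omega)
    · next h => intro hlt hcon; exact h ⟨hlt, hcon⟩

theorem bRun_eq_of (cs : List Char) (c : Char) (j' : Nat)
    (hstop : ¬ (j' < cs.length ∧ cs[j']! = c)) (fuel : Nat) :
    ∀ j, j ≤ j' → j' ≤ fuel + j → (∀ m, j ≤ m → m < j' → m < cs.length ∧ cs[m]! = c) →
    bRun cs c fuel j = j' := by
  induction fuel with
  | zero =>
    intro j hle hfu _
    simp only [bRun]; omega
  | succ n ih =>
    intro j hle hfu hmem
    rcases Nat.eq_or_lt_of_le hle with rfl | hlt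
    · simp only [bRun]
      rw [if_neg hstop]
    · simp only [bRun]
      rw [if_pos (hmem j (Nat.le_refl j) hlt)]
      exact ih (j+1) (by omega) (by omega) (fun m h1 h2 => hmem m (by omega) h2)

theorem aRun_eq (cs : List Char) (fuel : Nat) :
    ∀ i t, aRun cs fuel i t + i + 1 = t + bRun cs (cs[i]!) fuel (i+1) := by
  induction fuel with
  | zero => intro i t; simp only [aRun, bRun]; omega
  | succ n ih =>
    intro i t
    simp only [aRun, bRun]
    by_cases h : i + 1 < cs.length ∧ cs[i]! = cs[i+1]!
    · rw [if_pos h, if_pos ⟨h.1, h.2.symm⟩]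
      have ih' := ih (i+1) (t+1)
      rw [← h.2] at ih'
      omega
    · rw [if_neg h, if_neg (fun hc => h ⟨hc.1, hc.2.symm⟩)]
      omega

-- A's temp_length at index k inside the run starting at i equals (run end) - k
theorem aRun_val (cs : List Char) (i k : Nat) (hi : i < cs.length)
    (hk1 : i ≤ k) (hk2 : k < bRun cs (cs[i]!) cs.length i) :
    aRun cs cs.length k 1 = bRun cs (cs[i]!) cs.length i - k := by
  set j := bRun cs (cs[i]!) cs.length i with hj
  have hkn : k < cs.length ∧ cs[k]! = cs[i]! := bRun_mem cs (cs[i]!) cs.length i k hk1 hk2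
  have hjn : j ≤ cs.length := bRun_le cs (cs[i]!) cs.length i (Nat.le_of_lt hi)
  have hstopk : ¬ (j < cs.length ∧ cs[j]! = cs[k]!) := by
    rw [hkn.2]
    intro hcon
    exact bRun_stop cs (cs[i]!) cs.length i (by omega) hcon.1 hcon.2
  have hb2 : bRun cs (cs[k]!) cs.length (k+1) = j := by
    apply bRun_eq_of cs (cs[k]!) j hstopk cs.length (k+1) (by omega) (by omega)
    intro m h1 h2
    have := bRun_mem cs (cs[i]!) cs.length i m (by omega) h2
    rw [hkn.2]; exact this
  have harun := aRun_eq cs cs.length k 1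
  rw [hb2] at harun
  omega

-- the per-suffix sum of A over one run: g L = sum_{m=1..L} m/3
def g : Nat → Nat
  | 0 => 0
  | L + 1 => (L + 1) / 3 + g L

theorem tri_succ (a : Nat) : (a + 1) * a / 2 = a * (a - 1) / 2 + a := by
  cases a with
  | zero => rfl
  | succ n =>
    have h : (n + 1 + 1) * (n + 1) = (n + 1) * n + 2 * (n + 1) := by ring
    have h2 : (n + 1) * (n + 1 - 1) = (n + 1) * n := by simp
    rw [h2]
    omega

theorem g_form (a b : Nat) (hb : b < 3) :
    g (3 * a + b) = 3 * (a * (a - 1) / 2) + a * (b + 1) := by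
  induction a generalizing b with
  | zero =>
    interval_cases b <;> simp [g]
  | succ n ih =>
    have h1 : 3 * (n + 1) + b = (3 * n + b + 2) + 1 := by omega
    have h2 : 3 * n + b + 2 = (3 * n + b + 1) + 1 := by omega
    have h3 : 3 * n + b + 1 = (3 * n + b) + 1 := by omega
    rw [h1, g, h2, g, h3, g, ih b hb]
    have hsub : (n + 1) * (n + 1 - 1) = (n + 1) * n := by simp
    rw [hsub]
    have htri := tri_succ n
    have hmul : (n + 1) * (b + 1) = n * (b + 1) + (b + 1) := by ring
    omega

theorem three_mul_half (q : Nat) : 3 * q * (q - 1) / 2 = 3 * (q * (q - 1) / 2) := by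
  have heq : ∃ u, q * (q - 1) = 2 * u := by
    cases q with
    | zero => exact ⟨0, rfl⟩
    | succ n =>
      simp only [Nat.add_sub_cancel]
      rcases (Nat.even_mul_succ_self n) with ⟨u, hu⟩
      exact ⟨u, by rw [Nat.mul_comm]; omega⟩
  obtain ⟨u, hu⟩ := heq
  rw [Nat.mul_assoc, hu]; omega

-- B's closed form per run equals g
theorem closed_g (L : Nat) :
    3 * ((L + 1) / 3) * ((L + 1) / 3 - 1) / 2 + (L + 1) / 3 * ((L + 1) % 3) = g L := by
  have hL : L = 3 * (L / 3) + L % 3 := by omega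
  have hb : L % 3 < 3 := by omega
  set a := L / 3 with ha
  set b := L % 3 with hbdef
  rw [hL, g_form a b hb]
  interval_cases b
  · have hq : (3 * a + 0 + 1) / 3 = a := by omega
    have hr : (3 * a + 0 + 1) % 3 = 1 := by omega
    rw [hq, hr]
    have h3 := three_mul_half a
    omega
  · have hq : (3 * a + 1 + 1) / 3 = a := by omega
    have hr : (3 * a + 1 + 1) % 3 = 2 := by omega
    rw [hq, hr]
    have h3 := three_mul_half a
    omega
  · have hq : (3 * a + 2 + 1) / 3 = a + 1 := by omega
    have hr : (3 * a + 2 + 1) % 3 = 0 := by omega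
    rw [hq, hr]
    have h3 := three_mul_half (a + 1)
    have htri := tri_succ a
    simp only [Nat.add_sub_cancel] at h3 ⊢
    omega

-- folding A's body over a full run [i, i+L) adds g L
theorem foldl_run_sum (cs : List Char) (L : Nat) :
    ∀ i a, (∀ k, i ≤ k → k < i + L → aRun cs cs.length k 1 = i + L - k) →
    (List.range' i L).foldl (fun acc k => acc + aRun cs cs.length k 1 / 3) a = a + g L := by
  induction L with
  | zero => intro i a _; simp [g]
  | succ n ih =>
    intro i a hF
    rw [List.range'_succ, List.foldl_cons]
    have hFi : aRun cs cs.length i 1 = n + 1 := by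
      have := hF i (Nat.le_refl i) (by omega); omega
    rw [hFi, ih (i+1) (a + (n+1)/3) (fun k h1 h2 => by have := hF k (by omega) (by omega); omega)]
    simp [g]; omega

-- main loop correspondence: A's remaining sum from index i equals B's loop from i
theorem main_loop (cs : List Char) (fuel : Nat) :
    ∀ i a, cs.length ≤ fuel + i → i ≤ cs.length →
    (List.range' i (cs.length - i)).foldl (fun acc k => acc + aRun cs cs.length k 1 / 3) a
      = bLoop cs fuel i a := by
  induction fuel with
  | zero =>
    intro i a hf hi
    have hz : cs.length - i = 0 := by omega
    rw [hz]
    simp only [List.range'_zero, List.foldl_nil, bLoop]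
  | succ n ih =>
    intro i a hf hi
    by_cases h : i < cs.length
    · simp only [bLoop, if_pos h]
      set J := bRun cs (cs[i]!) cs.length i with hJ
      have hji : i + 1 ≤ J := by
        have := bRun_start_lt cs (cs[i]!) cs.length i h rfl (by omega)
        omega
      have hjn : J ≤ cs.length := by
        have := bRun_le cs (cs[i]!) cs.length i (Nat.le_of_lt h)
        omega
      rw [← ih J _ (by omega) hjn]
      have hsplit : cs.length - i = (J - i) + (cs.length - J) := by omega
      rw [hsplit, ← List.range'_append, List.foldl_append]
      have hij : i + 1 * (J - i) = J := by omega
      rw [hij]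
      have hrun : (List.range' i (J - i)).foldl (fun acc k => acc + aRun cs cs.length k 1 / 3) a
          = a + g (J - i) := by
        apply foldl_run_sum
        intro k h1 h2
        have hv := aRun_val cs i k h h1 (by omega)
        omega
      rw [hrun]
      have hacc : a + g (J - i)
          = a + 3 * ((J - i + 1) / 3) * ((J - i + 1) / 3 - 1) / 2
              + (J - i + 1) / 3 * ((J - i + 1) % 3) := by
        have := closed_g (J - i)
        omega
      rw [hacc]
    · have hz : cs.length - i = 0 := by omega
      rw [hz]
      simp only [List.range'_zero, List.foldl_nil, bLoop, if_neg h]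

theorem solution_eq (s : String) : solution s = solution_alt s := by
  unfold solution solution_alt
  by_cases he : s.toList.isEmpty
  · rw [if_pos he]
    have hlen : s.toList.length = 0 := by simpa [List.isEmpty_iff_length_eq_zero] using he
    rw [hlen]
    simp [bLoop]
  · rw [if_neg he]
    have hmain := main_loop s.toList s.toList.length 0 0 (by omega) (by omega)
    rw [List.range_eq_range']
    simp only [Nat.sub_zero] at hmain
    rw [hmain]

-- ===== VERDICT (by name: the statement is the Claim_ definition above) =====
theorem solution_spec : Claim_equal_solution := by
  intro s _
  unfold Spec_solution
  exact solution_eq s
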